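-- pv_equiv track=rewrite | github.com/iwancat/readFile | nixFenci.py | cizai
-- ===== SOURCE A (Python) =====
-- def cizai(qieci, cilist):
--     tmp_w = qieci
--     tmp_len = len(tmp_w)
--     ci_W = ''
--     while tmp_len >= 1:
--         if tmp_w in cilist:
--             ci_W = tmp_w
--             break
--         else:
--             tmp_len = tmp_len - 1
--             tmp_w = tmp_w[-tmp_len:]
--     return ci_W
-- ===== SOURCE B (Python) =====
-- def cizai(qieci, cilist):
--     best = ''
--     for w in cilist:
--         if qieci.endswith(w) and len(w) > len(best):
--             best = w
--     return best
-- ===== Notes on version B (the rewrite author's own statement) =====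
-- stated objective: faster
-- what changed: Instead of shrinking the suffix of qieci one character at a time and testing membership in cilist (repeated slicing plus a list scan per suffix), B scans the word list once keeping the longest word that is a suffix of qieci (strict length comparison, so no-match and the empty word both yield '').
import Mathlib
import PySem

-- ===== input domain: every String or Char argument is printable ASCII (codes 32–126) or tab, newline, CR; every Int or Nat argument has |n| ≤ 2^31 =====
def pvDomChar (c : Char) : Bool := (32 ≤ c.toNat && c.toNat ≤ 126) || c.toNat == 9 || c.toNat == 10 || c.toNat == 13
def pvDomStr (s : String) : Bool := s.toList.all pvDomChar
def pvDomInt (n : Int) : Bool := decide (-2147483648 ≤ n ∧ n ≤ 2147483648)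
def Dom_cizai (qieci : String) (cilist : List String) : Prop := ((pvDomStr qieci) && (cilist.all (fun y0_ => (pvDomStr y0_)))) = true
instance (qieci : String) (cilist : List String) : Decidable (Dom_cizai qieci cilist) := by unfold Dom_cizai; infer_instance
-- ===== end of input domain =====

-- B scans the word list once keeping the longest word ending qieci, instead of A's
-- shrink-the-suffix membership loop; same return value on every input, measurably faster.

-- ===== PORT A =====
-- A's while-loop: tmp_len counts down from len(qieci); tmp_w is the current suffix.
def cizaiLoop (cilist : List String) : Nat → String → String → String
  | 0, _, ciW => ciW
  | n + 1, tmp_w, ciW =>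
      if tmp_w ∈ cilist then tmp_w
      else cizaiLoop cilist n (PySem.Str.slice tmp_w (some (-(n : Int))) none) ciW

def cizai (qieci : String) (cilist : List String) : String :=
  cizaiLoop cilist (PySem.Str.len qieci).toNat qieci ""

-- ===== PORT B =====
def cizai_alt (qieci : String) (cilist : List String) : String :=
  cilist.foldl
    (fun best w =>
      if PySem.Str.endswith qieci w && decide (PySem.Str.len best < PySem.Str.len w) then w
      else best) ""

-- ===== PRECONDITION & SPEC =====
def Spec_cizai (qieci : String) (cilist : List String) (out : String) : Prop := out = cizai_alt qieci cilist
instance (qieci : String) (cilist : List String) (out : String) : Decidable (Spec_cizai qieci cilist out) := by unfold Spec_cizai; infer_instance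

-- ===== CLAIM (what is proved, stated in full; the proofs are below) =====
def Claim_equal_cizai : Prop := ∀ (qieci : String) (cilist : List String), Dom_cizai qieci cilist → Spec_cizai qieci cilist (cizai qieci cilist)

-- ===== LEMMAS AND PROOFS =====

-- length of the longest word of l that is a suffix of q (0 if none)
def pvMlen (q : String) (l : List String) : Nat :=
  l.foldr (fun w m => if PySem.Str.endswith q w then max w.toList.length m else m) 0

theorem pv_endswith_suffix (q w : String) :
    PySem.Str.endswith q w = true ↔ w.toList <:+ q.toList := by
  rw [PySem.Str.endswith_eq, PySem.Chars.endswith_iff]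

theorem pvMlen_nil (q : String) : pvMlen q [] = 0 := rfl

theorem pvMlen_cons (q v : String) (l : List String) :
    pvMlen q (v :: l) =
      if PySem.Str.endswith q v then max v.toList.length (pvMlen q l) else pvMlen q l := rfl

theorem pvMlen_le (q : String) (l : List String) : pvMlen q l ≤ q.toList.length := by
  induction l with
  | nil => simp [pvMlen_nil]
  | cons w l ih =>
    rw [pvMlen_cons]
    split_ifs with h
    · exact max_le ((pv_endswith_suffix q w).1 h).length_le ih
    · exact ih

theorem pv_mem_le_Mlen (q : String) {w : String} {l : List String}
    (hm : w ∈ l) (he : PySem.Str.endswith q w = true) :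
    w.toList.length ≤ pvMlen q l := by
  induction l with
  | nil => cases hm
  | cons v l ih =>
    rw [pvMlen_cons]
    rcases List.mem_cons.1 hm with rfl | hm
    · rw [if_pos he]; exact le_max_left _ _
    · have h' := ih hm
      split_ifs with h
      · exact h'.trans (le_max_right _ _)
      · exact h'

theorem pvMlen_attained (q : String) (l : List String) :
    pvMlen q l = 0 ∨ ∃ w ∈ l, PySem.Str.endswith q w = true ∧ w.toList.length = pvMlen q l := by
  induction l with
  | nil => left; rfl
  | cons v l ih =>
    rw [pvMlen_cons]
    split_ifs with h
    · rcases max_choice v.toList.length (pvMlen q l) with he | he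
      · right; exact ⟨v, List.mem_cons_self, h, he.symm⟩
      · rw [he]
        rcases ih with h0 | ⟨w, hw, hew, hl⟩
        · left; exact h0
        · right; exact ⟨w, List.mem_cons_of_mem v hw, hew, hl⟩
    · rcases ih with h0 | ⟨w, hw, hew, hl⟩
      · left; exact h0
      · right; exact ⟨w, List.mem_cons_of_mem v hw, hew, hl⟩

theorem pv_foldB_inv (q : String) (l : List String) : ∀ (best : String),
    best.toList <:+ q.toList →
    (List.foldl
      (fun best w =>
        if PySem.Str.endswith q w && decide (PySem.Str.len best < PySem.Str.len w) then w
        else best) best l).toList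
      = q.toList.drop (q.toList.length - max best.toList.length (pvMlen q l)) := by
  induction l with
  | nil =>
    intro best hb
    simpa [pvMlen_nil] using List.suffix_iff_eq_drop.1 hb
  | cons w l ih =>
    intro best hb
    simp only [List.foldl_cons]
    rw [pvMlen_cons]
    by_cases he : PySem.Str.endswith q w = true
    · by_cases hlt : PySem.Str.len best < PySem.Str.len w
      · rw [if_pos (show (_ && _) = true by rw [he, decide_eq_true hlt]; rfl)]
        rw [ih w ((pv_endswith_suffix q w).1 he)]
        have hlen : best.toList.length < w.toList.length := by
          simpa [PySem.Str.len_eq] using hlt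
        rw [if_pos he]
        congr 1
        omega
      · rw [if_neg (show ¬ (_ && _) = true by
          simp only [Bool.and_eq_true, decide_eq_true_eq]; rintro ⟨-, h⟩; exact hlt h)]
        rw [ih best hb]
        have hlen : ¬ best.toList.length < w.toList.length := by
          simpa [PySem.Str.len_eq] using hlt
        rw [if_pos he]
        congr 1
        omega
    · rw [if_neg (show ¬ (_ && _) = true by
        simp only [Bool.and_eq_true, decide_eq_true_eq]; rintro ⟨h, -⟩; exact he h)]
      rw [ih best hb, if_neg he]

theorem pv_loopA_inv (q : String) (cilist : List String) : ∀ (n : Nat) (tmp_w : String),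
    n ≤ q.toList.length →
    (0 < n → tmp_w.toList = q.toList.drop (q.toList.length - n)) →
    pvMlen q cilist ≤ n →
    (cizaiLoop cilist n tmp_w "").toList
      = q.toList.drop (q.toList.length - pvMlen q cilist) := by
  intro n
  induction n with
  | zero =>
    intro tmp_w _ _ hM
    have h0 : pvMlen q cilist = 0 := Nat.le_zero.1 hM
    simp [cizaiLoop, h0]
  | succ n ih =>
    intro tmp_w hle htl hM
    have htl' := htl (Nat.succ_pos n)
    have hlen : tmp_w.toList.length = n + 1 := by
      rw [htl', List.length_drop]; omega
    rw [cizaiLoop]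
    by_cases hmem : tmp_w ∈ cilist
    · rw [if_pos hmem]
      have hsuf : tmp_w.toList <:+ q.toList := htl' ▸ List.drop_suffix _ _
      have hge : n + 1 ≤ pvMlen q cilist :=
        hlen ▸ pv_mem_le_Mlen q hmem ((pv_endswith_suffix q tmp_w).2 hsuf)
      have hMeq : pvMlen q cilist = n + 1 := le_antisymm hM hge
      rw [hMeq, htl']
    · rw [if_neg hmem]
      have hM' : pvMlen q cilist ≤ n := by
        rcases Nat.lt_or_ge (pvMlen q cilist) (n + 1) with h | h
        · omega
        · exfalso
          have heq : pvMlen q cilist = n + 1 := le_antisymm hM h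
          rcases pvMlen_attained q cilist with h0 | ⟨w, hw, hew, hl⟩
          · omega
          · have hsw : w.toList <:+ q.toList := (pv_endswith_suffix q w).1 hew
            have hwt : w.toList = q.toList.drop (q.toList.length - (n + 1)) := by
              rw [List.suffix_iff_eq_drop.1 hsw, hl, heq]
            have hweq : w = tmp_w := String.toList_inj.1 (by rw [hwt, htl'])
            exact hmem (hweq ▸ hw)
      apply ih _ (by omega) _ hM'
      intro hn
      rw [PySem.Str.toList_slice, PySem.Chars.slice_eq_listSlice,
        PySem.List.slice_from_neg_natCast _ n hn, hlen, htl', List.drop_drop]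
      congr 1
      omega

-- ===== VERDICT (by name: the statement is the Claim_ definition above) =====
theorem cizai_spec : Claim_equal_cizai := by
  unfold Claim_equal_cizai
  intro q cilist _
  unfold Spec_cizai
  apply String.toList_inj.1
  have hA : (cizai q cilist).toList = q.toList.drop (q.toList.length - pvMlen q cilist) := by
    have hn : (PySem.Str.len q).toNat = q.toList.length := by
      simp [PySem.Str.len_eq]
    unfold cizai
    rw [hn]
    exact pv_loopA_inv q cilist q.toList.length q le_rfl
      (fun _ => by simp) (pvMlen_le q cilist)
  have hB : (cizai_alt q cilist).toList = q.toList.drop (q.toList.length - pvMlen q cilist) := by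
    unfold cizai_alt
    have h := pv_foldB_inv q cilist "" (by simp)
    simpa using h
  rw [hA, hB]
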